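-- pv_equiv track=rewrite | github.com/Cycyber/CCPS109---Computer-Science-1 | labs109.py | is_left_handed
-- ===== SOURCE A (Python) =====
-- def is_left_handed(pips):
--     pips_list = []
--     left_hand_possibles = [[6, 4, 5], [1, 2, 3], [1, 5, 4], [3, 1, 2], [1, 4, 2], [2, 1, 4], [4, 2, 1], [1, 3, 5],
--                            [5, 1, 3], [2, 3, 1], [4, 1, 5], [5, 4, 1], [6, 2, 4], [3, 2, 6], [6, 3, 2], [2, 4, 6],
--                            [4, 6, 2], [2, 6, 3], [3, 6, 5], [5, 3, 6], [3, 5, 1], [4, 5, 6], [5, 6, 4], [6, 5, 3]]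
--     for i in pips:
--         pips_list.append(i)
--     if pips_list[:] in left_hand_possibles[:]:
--         return True
--     else:
--         return False
-- ===== SOURCE B (Python) =====
-- def is_left_handed(pips):
--     lst = list(pips)
--     if len(lst) != 3:
--         return False
--     canon = [[1, 2, 3], [1, 3, 5], [1, 4, 2], [1, 5, 4],
--              [6, 2, 4], [6, 3, 2], [6, 4, 5], [6, 5, 3]]
--     return any(lst[i:] + lst[:i] in canon for i in range(3))
-- ===== Notes on version B (the rewrite author's own statement) =====
-- stated objective: simpler
-- what changed: B replaces A's flat 24-triple table scan by a length-3 guard plus a check whether any of the three cyclic rotations of the input occurs in an 8-triple table of canonical left-handed corners.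
import Mathlib
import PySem

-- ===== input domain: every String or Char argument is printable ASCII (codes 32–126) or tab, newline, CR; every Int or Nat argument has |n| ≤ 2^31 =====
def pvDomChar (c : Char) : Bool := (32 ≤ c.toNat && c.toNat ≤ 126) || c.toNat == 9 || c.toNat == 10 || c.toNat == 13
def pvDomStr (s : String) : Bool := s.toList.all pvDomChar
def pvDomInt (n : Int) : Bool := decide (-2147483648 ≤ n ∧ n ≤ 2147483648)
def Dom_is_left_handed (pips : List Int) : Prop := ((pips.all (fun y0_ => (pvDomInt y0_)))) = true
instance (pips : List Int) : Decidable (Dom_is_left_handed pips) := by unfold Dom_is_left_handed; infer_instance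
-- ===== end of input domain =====

-- B checks the three cyclic rotations of the input against a table of the 8 canonical left-handed corner triples, instead of A's flat scan of all 24 triples: simpler.

-- ===== PORT A =====
def is_left_handed (pips : List Int) : Bool :=
  -- pips_list built by appending each element of pips in turn
  let pips_list := pips.foldl (fun acc i => acc ++ [i]) []
  let left_hand_possibles : List (List Int) :=
    [[6, 4, 5], [1, 2, 3], [1, 5, 4], [3, 1, 2], [1, 4, 2], [2, 1, 4], [4, 2, 1], [1, 3, 5],
     [5, 1, 3], [2, 3, 1], [4, 1, 5], [5, 4, 1], [6, 2, 4], [3, 2, 6], [6, 3, 2], [2, 4, 6],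
     [4, 6, 2], [2, 6, 3], [3, 6, 5], [5, 3, 6], [3, 5, 1], [4, 5, 6], [5, 6, 4], [6, 5, 3]]
  if pips_list ∈ left_hand_possibles then true else false

-- ===== PORT B =====
def is_left_handed_alt (pips : List Int) : Bool :=
  let lst := pips
  if lst.length ≠ 3 then false
  else
    let canon : List (List Int) :=
      [[1, 2, 3], [1, 3, 5], [1, 4, 2], [1, 5, 4],
       [6, 2, 4], [6, 3, 2], [6, 4, 5], [6, 5, 3]]
    (List.range 3).any (fun i => (lst.drop i ++ lst.take i) ∈ canon)

-- ===== PRECONDITION & SPEC =====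
def Spec_is_left_handed (pips : List Int) (out : Bool) : Prop := out = is_left_handed_alt pips
instance (pips : List Int) (out : Bool) : Decidable (Spec_is_left_handed pips out) := by unfold Spec_is_left_handed; infer_instance

-- ===== CLAIM (what is proved, stated in full; the proofs are below) =====
def Claim_equal_is_left_handed : Prop := ∀ (pips : List Int), Dom_is_left_handed pips → Spec_is_left_handed pips (is_left_handed pips)

-- ===== LEMMAS AND PROOFS =====

theorem is_left_handed_eq (pips : List Int) : is_left_handed pips = is_left_handed_alt pips := by
  have hcopy : pips.foldl (fun acc i => acc ++ [i]) ([] : List Int) = pips := by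
    rw [PySem.List.foldl_append_singleton]; simp
  match pips with
  | [] => simp [is_left_handed, is_left_handed_alt]
  | [a] => simp [is_left_handed, is_left_handed_alt]
  | [a, b] => simp [is_left_handed, is_left_handed_alt]
  | a :: b :: c :: d :: rest => simp [is_left_handed, is_left_handed_alt, hcopy]
  | [a, b, c] =>
    simp only [is_left_handed, is_left_handed_alt, hcopy]
    simp only [List.length_cons, List.length_nil, List.range, List.range.loop, List.any_cons,
      List.any_nil, List.drop, List.take, List.append_nil, List.nil_append, List.cons_append,
      List.mem_cons, List.not_mem_nil, or_false]
    by_cases h : [a, b, c] ∈ ([[6, 4, 5], [1, 2, 3], [1, 5, 4], [3, 1, 2], [1, 4, 2], [2, 1, 4], [4, 2, 1], [1, 3, 5],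
     [5, 1, 3], [2, 3, 1], [4, 1, 5], [5, 4, 1], [6, 2, 4], [3, 2, 6], [6, 3, 2], [2, 4, 6],
     [4, 6, 2], [2, 6, 3], [3, 6, 5], [5, 3, 6], [3, 5, 1], [4, 5, 6], [5, 6, 4], [6, 5, 3]] : List (List Int))
    · have h2 := h
      simp only [List.mem_cons, List.not_mem_nil, or_false, List.cons.injEq, and_true] at h2
      rcases h2 with h2|h2|h2|h2|h2|h2|h2|h2|h2|h2|h2|h2|h2|h2|h2|h2|h2|h2|h2|h2|h2|h2|h2|h2 <;>
        · obtain ⟨ha, hb, hc⟩ := h2; subst ha hb hc; decide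
    · simp only [List.mem_cons, List.not_mem_nil, or_false] at h
      rw [if_neg h]
      rw [if_neg (show ¬(0 + 1 + 1 + 1 ≠ 3) by norm_num)]
      simp only [List.cons.injEq, and_true, not_or] at h
      symm
      simp only [Bool.or_eq_false_iff, decide_eq_false_iff_not, List.cons.injEq, and_true, not_or]
      refine ⟨⟨?_,?_,?_,?_,?_,?_,?_,?_⟩,⟨?_,?_,?_,?_,?_,?_,?_,?_⟩,⟨?_,?_,?_,?_,?_,?_,?_,?_⟩⟩ <;>
        · rintro ⟨rfl, rfl, rfl⟩
          simp_all

-- ===== VERDICT (by name: the statement is the Claim_ definition above) =====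
theorem is_left_handed_spec : Claim_equal_is_left_handed := by
  intro pips _
  unfold Spec_is_left_handed
  exact is_left_handed_eq pips
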